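-- pv_equiv track=rewrite | github.com/burning-calamity/extirpation | src/extirpation/bundled_online/checkerboard_straddling.py | _build_checkerboard
-- ===== SOURCE A (Python) =====
-- ALPHABET = 'ABCDEFGHIJKLMNOPQRSTUVWXYZ'
--
-- def _dedupe(text: str) -> str:
--     seen: set[str] = set()
--     out: list[str] = []
--     for ch in text:
--         if ch not in seen:
--             seen.add(ch)
--             out.append(ch)
--     return ''.join(out)
--
-- def _build_checkerboard(keyword: str, row_digits: tuple[str, str]) -> tuple[dict[str, str], dict[str, str]]:
--     if len(row_digits) != 2 or row_digits[0] == row_digits[1]: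
--         raise ValueError('row_digits must contain exactly two distinct digits')
--
--     top_digits = [d for d in '0123456789' if d not in row_digits]
--     ordered = _dedupe(''.join(ch for ch in keyword.upper() if ch.isalpha()) + ALPHABET + ' ')
--
--     enc: dict[str, str] = {}
--     dec: dict[str, str] = {}
--
--     first_row = ordered[: len(top_digits)]
--     rest = ordered[len(top_digits) :]
--
--     for d, ch in zip(top_digits, first_row):
--         enc[ch] = d
--         dec[d] = ch
--
--     for row_idx, row_digit in enumerate(row_digits):
--         row_chars = rest[row_idx * 10 : (row_idx + 1) * 10]
--         for col_digit, ch in enumerate(row_chars):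
--             code = f'{row_digit}{col_digit}'
--             enc[ch] = code
--             dec[code] = ch
--
--     return enc, dec
-- ===== SOURCE B (Python) =====
-- ALPHABET = 'ABCDEFGHIJKLMNOPQRSTUVWXYZ'
--
-- def _dedupe(text: str) -> str:
--     seen: set[str] = set()
--     out: list[str] = []
--     for ch in text:
--         if ch not in seen:
--             seen.add(ch)
--             out.append(ch)
--     return ''.join(out)
--
-- def _build_checkerboard(keyword: str, row_digits: tuple[str, str]) -> tuple[dict[str, str], dict[str, str]]:
--     if len(row_digits) != 2 or row_digits[0] == row_digits[1]:
--         raise ValueError('row_digits must contain exactly two distinct digits')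
--
--     top_digits = [d for d in '0123456789' if d not in row_digits]
--     ordered = _dedupe(''.join(ch for ch in keyword.upper() if ch.isalpha()) + ALPHABET + ' ')
--
--     # one flat list of all codes in layout order: single digits, then row0 codes, then row1 codes
--     codes = top_digits + [f'{rd}{c}' for rd in row_digits for c in range(10)]
--
--     enc: dict[str, str] = {}
--     dec: dict[str, str] = {}
--     for ch, code in zip(ordered, codes):
--         enc[ch] = code
--         dec[code] = ch
--     return enc, dec
-- ===== Notes on version B (the rewrite author's own statement) =====
-- stated objective: simpler
-- what changed: B replaces A's separate first-row zip loop and the nested enumerate(row_digits)/enumerate(row_chars) loops with their slice arithmetic by building one flat list of all codes (top digits, then the twenty two-digit codes) and filling both dicts in a single zip pass over the ordered characters.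
import Mathlib
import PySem

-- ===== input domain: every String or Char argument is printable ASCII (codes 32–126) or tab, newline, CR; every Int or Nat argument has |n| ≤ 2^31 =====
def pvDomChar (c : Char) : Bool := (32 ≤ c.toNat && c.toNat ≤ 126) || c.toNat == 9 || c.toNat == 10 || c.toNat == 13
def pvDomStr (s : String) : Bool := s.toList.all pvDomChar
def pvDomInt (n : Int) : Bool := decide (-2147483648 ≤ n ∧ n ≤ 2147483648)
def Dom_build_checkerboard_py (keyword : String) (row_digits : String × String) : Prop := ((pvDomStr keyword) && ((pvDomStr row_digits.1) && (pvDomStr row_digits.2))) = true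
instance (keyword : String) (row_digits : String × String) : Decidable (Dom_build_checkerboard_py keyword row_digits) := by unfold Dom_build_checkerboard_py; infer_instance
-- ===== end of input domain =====

-- B replaces A's separate first-row loop and nested row/column loops (with slice arithmetic)
-- by one flat list of all codes and a single zip pass filling both dicts (objective: simpler).

-- ===== PORT A =====
-- shared module constant ALPHABET (identical in Source A and Source B)
def pvALPHABET : List Char := "ABCDEFGHIJKLMNOPQRSTUVWXYZ".toList

-- shared module helper _dedupe (identical in Source A and Source B): set `seen` + list `out` loop
def pvDedupeGo : List Char → PySem.Set Char → List Char → List Char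
  | [], _, out => out
  | ch :: t, seen, out =>
    if PySem.Set.contains seen ch then pvDedupeGo t seen out
    else pvDedupeGo t (PySem.Set.add seen ch) (out ++ [ch])

def pvDedupe (text : List Char) : List Char := pvDedupeGo text PySem.Set.empty []

-- the initial `raise ValueError` (row_digits[0] == row_digits[1]; len is always 2 here) is excluded by Pre_
def build_checkerboard_py (keyword : String) (row_digits : String × String) : (List (String × String)) × (List (String × String)) :=
  let top_digits : List String :=
    (("0123456789".toList).map (fun d => String.ofList [d])).filter
      (fun d => !(d == row_digits.1 || d == row_digits.2))
  let ordered : List Char :=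
    pvDedupe (((PySem.Chars.upper keyword.toList).filter PySem.Chars.isalpha) ++ pvALPHABET ++ [' '])
  let first_row := PySem.List.slice ordered none (some (top_digits.length : Int))
  let rest := PySem.List.slice ordered (some (top_digits.length : Int)) none
  let s1 := (top_digits.zip first_row).foldl
      (fun (st : PySem.Dict String String × PySem.Dict String String) p =>
        (st.1.insert (String.ofList [p.2]) p.1, st.2.insert p.1 (String.ofList [p.2])))
      (PySem.Dict.empty, PySem.Dict.empty)
  let s2 := (PySem.List.enumerate [row_digits.1, row_digits.2]).foldl
      (fun st rp =>
        let row_chars := PySem.List.slice rest (some (rp.1 * 10)) (some ((rp.1 + 1) * 10))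
        (PySem.List.enumerate row_chars).foldl
          (fun st cp =>
            let code := rp.2 ++ PySem.Int.toStr cp.1   -- f'{row_digit}{col_digit}'
            (st.1.insert (String.ofList [cp.2]) code, st.2.insert code (String.ofList [cp.2]))) st) s1
  (s2.1.items, s2.2.items)

-- ===== PORT B =====
def build_checkerboard_py_alt (keyword : String) (row_digits : String × String) : (List (String × String)) × (List (String × String)) :=
  let top_digits : List String :=
    (("0123456789".toList).map (fun d => String.ofList [d])).filter
      (fun d => !(d == row_digits.1 || d == row_digits.2))
  let ordered : List Char :=
    pvDedupe (((PySem.Chars.upper keyword.toList).filter PySem.Chars.isalpha) ++ pvALPHABET ++ [' '])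
  let codes : List String :=
    top_digits ++ [row_digits.1, row_digits.2].flatMap
      (fun rd => (PySem.List.pyRange 0 10).map (fun c => rd ++ PySem.Int.toStr c))
  let s := (ordered.zip codes).foldl
      (fun (st : PySem.Dict String String × PySem.Dict String String) p =>
        (st.1.insert (String.ofList [p.1]) p.2, st.2.insert p.2 (String.ofList [p.1])))
      (PySem.Dict.empty, PySem.Dict.empty)
  (s.1.items, s.2.items)

-- ===== PRECONDITION & SPEC =====
-- Pre_ excludes exactly the inputs where A raises ValueError: the two row digits being equal
def Pre_build_checkerboard_py (keyword : String) (row_digits : String × String) : Prop :=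
  row_digits.1 ≠ row_digits.2
instance (keyword : String) (row_digits : String × String) : Decidable (Pre_build_checkerboard_py keyword row_digits) := by unfold Pre_build_checkerboard_py; infer_instance

def pvWitness_build_checkerboard_py : String × (String × String) := ("KEY", ("3", "7"))

def Spec_build_checkerboard_py (keyword : String) (row_digits : String × String) (out : (List (String × String)) × (List (String × String))) : Prop := out = build_checkerboard_py_alt keyword row_digits
instance (keyword : String) (row_digits : String × String) (out : (List (String × String)) × (List (String × String))) : Decidable (Spec_build_checkerboard_py keyword row_digits out) := by unfold Spec_build_checkerboard_py; infer_instance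

-- ===== CLAIM (what is proved, stated in full; the proofs are below) =====
def Claim_equal_build_checkerboard_py : Prop := ∀ (keyword : String) (row_digits : String × String), Dom_build_checkerboard_py keyword row_digits → Pre_build_checkerboard_py keyword row_digits → Spec_build_checkerboard_py keyword row_digits (build_checkerboard_py keyword row_digits)

-- ===== LEMMAS AND PROOFS =====

-- zip against a concatenation splits at the length of the first block (truncation handled by take/drop)
theorem pv_zip_split {α β : Type} (as bs : List β) (xs : List α) :
    xs.zip (as ++ bs) = (xs.take as.length).zip as ++ (xs.drop as.length).zip bs := by
  induction as generalizing xs with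
  | nil => simp
  | cons a at' ih =>
    cases xs with
    | nil => simp
    | cons x xt => simp [ih]

-- zipping with the mapped range [i, i+n) is A's enumerate-over-the-first-n-chars loop data
theorem pv_zip_pyRange_map (xs : List Char) (i : Int) (n : Nat) (f : Int → String) :
    xs.zip ((PySem.List.pyRange i (i + n)).map f) =
      (PySem.List.enumerate (xs.take n) i).map (fun p => (p.2, f p.1)) := by
  induction xs generalizing i n with
  | nil => simp [PySem.List.enumerate_nil]
  | cons x xt ih =>
    cases n with
    | zero =>
      rw [PySem.List.pyRange_one_eq_nil (by omega)]
      simp [PySem.List.enumerate_nil]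
    | succ m =>
      rw [PySem.List.pyRange_one_cons (by push_cast; omega)]
      have h : i + ((m + 1 : Nat) : Int) = (i + 1) + (m : Int) := by push_cast; omega
      rw [h]
      simp [List.take_succ_cons, PySem.List.enumerate_cons, ih (i + 1) m]

theorem build_checkerboard_py_spec' (keyword : String) (row_digits : String × String) :
    build_checkerboard_py keyword row_digits = build_checkerboard_py_alt keyword row_digits := by
  unfold build_checkerboard_py build_checkerboard_py_alt
  simp only [PySem.List.slice_to_natCast, PySem.List.slice_from_natCast]
  set top : List String :=
    (("0123456789".toList).map (fun d => String.ofList [d])).filter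
      (fun d => !(d == row_digits.1 || d == row_digits.2)) with htop
  set ord : List Char :=
    pvDedupe (((PySem.Chars.upper keyword.toList).filter PySem.Chars.isalpha) ++ pvALPHABET ++ [' ']) with hord
  -- B's codes list is three blocks; split the zip accordingly
  have hflat : [row_digits.1, row_digits.2].flatMap
      (fun rd => (PySem.List.pyRange 0 10).map (fun c => rd ++ PySem.Int.toStr c)) =
      ((PySem.List.pyRange 0 10).map (fun c => row_digits.1 ++ PySem.Int.toStr c)) ++
      ((PySem.List.pyRange 0 10).map (fun c => row_digits.2 ++ PySem.Int.toStr c)) := by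
    simp [List.flatMap]
  have hlen0 : ((PySem.List.pyRange 0 10).map (fun c => row_digits.1 ++ PySem.Int.toStr c)).length = 10 := by
    simp [PySem.List.length_pyRange_one]
  rw [hflat, pv_zip_split, pv_zip_split, hlen0]
  -- A's outer enumerate over the two rows, unfolded
  rw [show PySem.List.enumerate [row_digits.1, row_digits.2] = [(0, row_digits.1), (1, row_digits.2)] by
        simp [PySem.List.enumerate_cons, PySem.List.enumerate_nil]]
  simp only [List.foldl_cons, List.foldl_nil, List.foldl_append]
  -- normalize A's row slices to take/drop
  rw [show ((0 : Int) * 10) = ((0 : Nat) : Int) by norm_num,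
      show (((0 : Int) + 1) * 10) = ((10 : Nat) : Int) by norm_num,
      show ((1 : Int) * 10) = ((10 : Nat) : Int) by norm_num,
      show (((1 : Int) + 1) * 10) = ((20 : Nat) : Int) by norm_num,
      PySem.List.slice_natCast, PySem.List.slice_natCast]
  -- identify the three zip blocks with A's three loop data lists
  rw [show (10 : Int) = (0 : Int) + ((10 : Nat) : Int) by norm_num] 
  rw [pv_zip_pyRange_map, pv_zip_pyRange_map]
  have hseg :
      List.foldl (fun (st : PySem.Dict String String × PySem.Dict String String) p =>
          (st.1.insert (String.ofList [p.1]) p.2, st.2.insert p.2 (String.ofList [p.1])))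
        (PySem.Dict.empty, PySem.Dict.empty) ((List.take top.length ord).zip top) =
      List.foldl (fun st p => (st.1.insert (String.ofList [p.2]) p.1, st.2.insert p.1 (String.ofList [p.2])))
        (PySem.Dict.empty, PySem.Dict.empty) (top.zip (List.take top.length ord)) := by
    rw [← List.zip_swap top (List.take top.length ord), List.foldl_map]
    rfl
  simp [List.foldl_map, List.take_take, hseg]

-- ===== VERDICT (by name: the statement is the Claim_ definition above) =====
theorem build_checkerboard_py_spec : Claim_equal_build_checkerboard_py := by
  intro keyword row_digits _ _
  unfold Spec_build_checkerboard_py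
  exact build_checkerboard_py_spec' keyword row_digits
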